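-- pv_equiv track=rewrite | github.com/Arsen1302/Code-copy-detector | TestData/solutions/problem_1339_2.py | solution_1339_2
-- ===== SOURCE A (Python) =====
-- from typing import List
--
-- def solution_1339_2(s: str, words: List[str]) -> bool:
--
--     a = ''
--
--     for i in words:
--
--         a += i
--
--         if a == s:
--             return True
--         if not s.startswith(a):
--             break
--
--     return False
-- ===== SOURCE B (Python) =====
-- from typing import List
--
-- def solution_1339_2(s: str, words: List[str]) -> bool:
--     # Length-first scan: accumulate only lengths; the single string comparison
--     # happens at most once, when the running length hits len(s) exactly.
--     target = len(s)
--     run = 0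
--     for k, w in enumerate(words):
--         run += len(w)
--         if run >= target:
--             return run == target and ''.join(words[:k + 1]) == s
--     return False
-- ===== Notes on version B (the rewrite author's own statement) =====
-- stated objective: alternative
-- what changed: A concatenates words into a growing string and tests equality/startswith at every step; B scans only the word lengths, accumulating a running length, and performs at most one string comparison (a join of the prefix) when the running length hits len(s) exactly.
import Mathlib
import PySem

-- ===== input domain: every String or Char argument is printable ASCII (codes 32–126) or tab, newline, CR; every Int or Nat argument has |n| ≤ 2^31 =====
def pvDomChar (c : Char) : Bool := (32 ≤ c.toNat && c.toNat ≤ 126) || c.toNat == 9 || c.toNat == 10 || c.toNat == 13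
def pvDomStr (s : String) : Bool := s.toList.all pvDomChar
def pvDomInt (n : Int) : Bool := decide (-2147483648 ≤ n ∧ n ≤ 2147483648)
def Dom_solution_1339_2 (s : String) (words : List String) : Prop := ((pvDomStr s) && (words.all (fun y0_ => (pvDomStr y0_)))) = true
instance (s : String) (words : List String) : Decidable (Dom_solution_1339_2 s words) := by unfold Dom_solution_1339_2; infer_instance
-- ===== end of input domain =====

-- B replaces A's string concatenation/startswith scan by a length-only scan with a
-- single string comparison when the running length hits len(s) exactly (alternative decomposition).

-- ===== PORT A =====
-- A's for-loop over words, accumulating a (on code points); early returns kept in order.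
def pvGoA (s : List Char) (a : List Char) : List (List Char) → Bool
  | [] => false
  | i :: rest =>
    let a' := a ++ i
    if a' = s then true
    else if !(PySem.Chars.startswith s a') then false
    else pvGoA s a' rest

def solution_1339_2 (s : String) (words : List String) : Bool :=
  pvGoA s.toList [] (words.map String.toList)

-- ===== PORT B =====
-- B's for k, w in enumerate(words): run += len(w); on run >= target return run == target and ''.join(words[:k+1]) == s.
def pvGoB (s : List Char) (words : List (List Char)) (target : Int) :
    Int → Nat → List (List Char) → Bool
  | _, _, [] => false
  | run, k, w :: rest =>
    let run' := run + (w.length : Int)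
    if target ≤ run' then
      decide (run' = target) &&
        decide (PySem.Chars.join [] (PySem.List.slice words (some 0) (some ((k : Int) + 1))) = s)
    else pvGoB s words target run' (k + 1) rest

def solution_1339_2_alt (s : String) (words : List String) : Bool :=
  pvGoB s.toList (words.map String.toList) (PySem.Str.len s) 0 0 (words.map String.toList)

-- ===== PRECONDITION & SPEC =====
def Spec_solution_1339_2 (s : String) (words : List String) (out : Bool) : Prop := out = solution_1339_2_alt s words
instance (s : String) (words : List String) (out : Bool) : Decidable (Spec_solution_1339_2 s words out) := by unfold Spec_solution_1339_2; infer_instance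

-- ===== CLAIM (what is proved, stated in full; the proofs are below) =====
def Claim_equal_solution_1339_2 : Prop := ∀ (s : String) (words : List String), Dom_solution_1339_2 s words → Spec_solution_1339_2 s words (solution_1339_2 s words)

-- ===== LEMMAS AND PROOFS =====

theorem pv_join_nil_flatten (l : List (List Char)) :
    PySem.Chars.join [] l = l.flatten := by
  induction l with
  | nil => rfl
  | cons x xs ih =>
    cases xs with
    | nil => simp [PySem.Chars.join, List.intercalate]
    | cons y ys =>
      rw [PySem.Chars.join_cons_cons, ih]
      simp

theorem pv_take_succ_of_drop {α : Type} {words : List α} {k : Nat} {w : α} {rest : List α}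
    (h : words.drop k = w :: rest) :
    words.take (k + 1) = words.take k ++ [w] ∧ words.drop (k + 1) = rest := by
  constructor
  · have h0 : words[k]? = some w := by
      have hd : (words.drop k)[0]? = words[k + 0]? := List.getElem?_drop
      simpa [h] using hd.symm
    rw [List.take_add_one, h0]
    rfl
  · have := congrArg List.tail h
    simpa [List.tail_drop] using this

-- once the accumulated prefix is no longer a prefix of s, B can only return false
theorem pvGoB_false (s : List Char) (words : List (List Char)) (target : Int) :
    ∀ (rest : List (List Char)) (run : Int) (k : Nat),
      words.drop k = rest → ¬ ((words.take k).flatten <+: s) →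
      pvGoB s words target run k rest = false := by
  intro rest
  induction rest with
  | nil => intro run k _ _; rfl
  | cons w rest' ih =>
    intro run k hdrop hnp
    obtain ⟨htake, hdrop'⟩ := pv_take_succ_of_drop hdrop
    have hnp' : ¬ ((words.take (k + 1)).flatten <+: s) := by
      intro hp
      exact hnp (List.IsPrefix.trans (by simp [htake]) hp)
    have hc : ((k : Int) + 1) = (((k + 1 : Nat)) : Int) := by push_cast; ring
    have hKey : PySem.List.slice words none (some ((k : Int) + 1)) = words.take (k + 1) := by
      rw [hc, PySem.List.slice_to_natCast]
    have hne : ¬ ((words.take (k + 1)).flatten = s) := by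
      intro he
      exact hnp' (he ▸ List.prefix_refl _)
    rw [pvGoB]
    simp only [PySem.List.slice_zero_start, hKey, pv_join_nil_flatten]
    split
    · simp [hne]
    · exact ih (run + (w.length : Int)) (k + 1) hdrop' hnp'

theorem pvGo_main (s : List Char) (words : List (List Char)) :
    ∀ (rest : List (List Char)) (a : List Char) (k : Nat),
      words.drop k = rest → a = (words.take k).flatten →
      pvGoA s a rest = pvGoB s words ((s.length : Int)) ((a.length : Int)) k rest := by
  intro rest
  induction rest with
  | nil => intro a k _ _; rfl
  | cons w rest' ih =>
    intro a k hdrop ha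
    obtain ⟨htake, hdrop'⟩ := pv_take_succ_of_drop hdrop
    have hflat : (words.take (k + 1)).flatten = a ++ w := by simp [htake, ha]
    have hc : ((k : Int) + 1) = (((k + 1 : Nat)) : Int) := by push_cast; ring
    have hKey : PySem.List.slice words none (some ((k : Int) + 1)) = words.take (k + 1) := by
      rw [hc, PySem.List.slice_to_natCast]
    have hrun : (a.length : Int) + (w.length : Int) = ((a ++ w).length : Int) := by
      push_cast [List.length_append]; ring
    rw [pvGoA, pvGoB]
    simp only [PySem.List.slice_zero_start, hKey, pv_join_nil_flatten, hflat]
    by_cases heq : a ++ w = s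
    · -- A returns True; B's running length hits target exactly and the join equals s
      have hlen : (a.length : Int) + (w.length : Int) = (s.length : Int) := by
        rw [hrun, heq]
      simp [heq, hlen]
    · by_cases hge : (s.length : Int) ≤ (a.length : Int) + (w.length : Int)
      · -- overshoot (or equal length but unequal string): both return false
        have hnotpre : PySem.Chars.startswith s (a ++ w) = false := by
          rw [Bool.eq_false_iff]
          intro htrue
          have hp : (a ++ w) <+: s := PySem.Chars.startswith_iff s (a ++ w) |>.mp htrue
          have hle : s.length ≤ (a ++ w).length := by
            rw [hrun] at hge; exact_mod_cast hge
          exact heq (List.IsPrefix.eq_of_length_le hp hle)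
        simp [heq, hnotpre, hge]
      · -- running length still short of target: A checks the prefix, B recurses
        by_cases hpre : PySem.Chars.startswith s (a ++ w) = true
        · have hih := ih (a ++ w) (k + 1) hdrop' hflat.symm
          rw [hrun] at hge ⊢
          simp only [heq, if_false, hpre, Bool.not_true, Bool.false_eq_true, if_false,
            if_neg hge]
          exact hih
        · have hpre' : PySem.Chars.startswith s (a ++ w) = false := by
            simpa using hpre
          have hnp : ¬ ((words.take (k + 1)).flatten <+: s) := by
            rw [hflat]
            intro hp
            exact (Bool.eq_false_iff.mp hpre') ((PySem.Chars.startswith_iff s (a ++ w)).mpr hp)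
          have hB := pvGoB_false s words ((s.length : Int)) rest'
            ((a.length : Int) + (w.length : Int)) (k + 1) hdrop' hnp
          simp [heq, hpre', hge, hB]

-- ===== VERDICT (by name: the statement is the Claim_ definition above) =====
theorem solution_1339_2_spec : Claim_equal_solution_1339_2 := by
  intro s words _
  unfold Spec_solution_1339_2 solution_1339_2 solution_1339_2_alt
  have hlen : PySem.Str.len s = ((s.toList.length : Nat) : Int) := by
    simp [PySem.Str.len]
  rw [hlen]
  exact pvGo_main s.toList (words.map String.toList) (words.map String.toList) [] 0 rfl rfl
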